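-- pv_equiv track=rewrite | github.com/GBbartosz/Chinese_stock_market | preparedata0.py | find_nearest_price_date
-- ===== SOURCE A (Python) =====
-- def find_nearest_price_date(f_d_d, price_dates_list):
--     if f_d_d in price_dates_list:
--         f_p_d = f_d_d
--     else:
--         d = 0
--         while f_d_d > price_dates_list[d]:
--             d += 1
--         f_p_d = price_dates_list[d]
--     return f_p_d
-- ===== SOURCE B (Python) =====
-- def find_nearest_price_date(f_d_d, price_dates_list):
--     # Single forward pass: return f_d_d on an exact match; otherwise the
--     # first element greater than f_d_d (kept as a candidate while we keep
--     # scanning for a possible exact match).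
--     cand = None
--     for x in price_dates_list:
--         if x == f_d_d:
--             return f_d_d
--         if cand is None and x > f_d_d:
--             cand = x
--     if cand is None:
--         raise IndexError("no date >= f_d_d in price_dates_list")
--     return cand
-- ===== Notes on version B (the rewrite author's own statement) =====
-- stated objective: alternative
-- what changed: A's separate membership test followed by an index-based while scan is replaced by a single forward pass that early-returns on an exact match and otherwise remembers the first element greater than f_d_d.
import Mathlib
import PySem

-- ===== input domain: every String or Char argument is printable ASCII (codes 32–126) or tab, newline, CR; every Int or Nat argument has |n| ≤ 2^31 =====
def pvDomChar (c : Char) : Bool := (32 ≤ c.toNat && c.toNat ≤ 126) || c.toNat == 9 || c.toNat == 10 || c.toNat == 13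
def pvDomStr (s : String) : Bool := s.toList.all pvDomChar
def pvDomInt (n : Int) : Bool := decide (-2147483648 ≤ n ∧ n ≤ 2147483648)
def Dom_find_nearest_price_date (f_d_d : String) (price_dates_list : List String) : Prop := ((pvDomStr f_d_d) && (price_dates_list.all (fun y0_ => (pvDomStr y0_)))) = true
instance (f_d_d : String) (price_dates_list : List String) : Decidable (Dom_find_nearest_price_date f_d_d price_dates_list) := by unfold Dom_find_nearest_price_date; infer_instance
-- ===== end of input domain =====

-- B replaces A's membership test + index-based while scan by a single forward pass
-- that early-returns on an exact match and remembers the first element > f_d_d (objective: alternative).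

-- ===== PORT A =====
-- the while loop: scan indices from d while f_d_d > price_dates_list[d]; "" models the IndexError (outside Pre_)
def pvAWhile (f_d_d : String) (price_dates_list : List String) (d : Nat) : String :=
  if h : d < price_dates_list.length then
    if f_d_d > price_dates_list[d] then pvAWhile f_d_d price_dates_list (d + 1)
    else price_dates_list[d]
  else ""
termination_by price_dates_list.length - d

def find_nearest_price_date (f_d_d : String) (price_dates_list : List String) : String :=
  if f_d_d ∈ price_dates_list then f_d_d
  else pvAWhile f_d_d price_dates_list 0

-- ===== PORT B =====
-- one pass with a candidate accumulator; "" models B's IndexError when no candidate exists (outside Pre_)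
def pvBLoop (f_d_d : String) (cand : Option String) : List String → String
  | [] => match cand with
          | some c => c
          | none => ""
  | x :: xs =>
      if x = f_d_d then f_d_d
      else if cand.isNone ∧ f_d_d < x then pvBLoop f_d_d (some x) xs
      else pvBLoop f_d_d cand xs

def find_nearest_price_date_alt (f_d_d : String) (price_dates_list : List String) : String :=
  pvBLoop f_d_d none price_dates_list

-- ===== PRECONDITION & SPEC =====
-- Pre_ excludes exactly the inputs where A's while loop runs past the end of the list
-- (f_d_d not in the list and no element exceeds it): Python A raises IndexError there, and B raises too.
def Pre_find_nearest_price_date (f_d_d : String) (price_dates_list : List String) : Prop :=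
  f_d_d ∈ price_dates_list ∨ ∃ x ∈ price_dates_list, f_d_d < x
instance (f_d_d : String) (price_dates_list : List String) : Decidable (Pre_find_nearest_price_date f_d_d price_dates_list) := by unfold Pre_find_nearest_price_date; infer_instance

def pvWitness_find_nearest_price_date : String × List String := ("2020-01-03", ["2020-01-02", "2020-01-03", "2020-01-06"])

def Spec_find_nearest_price_date (f_d_d : String) (price_dates_list : List String) (out : String) : Prop := out = find_nearest_price_date_alt f_d_d price_dates_list
instance (f_d_d : String) (price_dates_list : List String) (out : String) : Decidable (Spec_find_nearest_price_date f_d_d price_dates_list out) := by unfold Spec_find_nearest_price_date; infer_instance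

-- ===== CLAIM (what is proved, stated in full; the proofs are below) =====
def Claim_equal_find_nearest_price_date : Prop := ∀ (f_d_d : String) (price_dates_list : List String), Dom_find_nearest_price_date f_d_d price_dates_list → Pre_find_nearest_price_date f_d_d price_dates_list → Spec_find_nearest_price_date f_d_d price_dates_list (find_nearest_price_date f_d_d price_dates_list)

-- ===== LEMMAS AND PROOFS =====

-- B returns f_d_d whenever f_d_d occurs in the list, whatever the candidate is
theorem pvBLoop_mem (f : String) (cand : Option String) (l : List String)
    (h : f ∈ l) : pvBLoop f cand l = f := by
  induction l generalizing cand with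
  | nil => cases h
  | cons x xs ih =>
    simp only [pvBLoop]
    by_cases hx : x = f
    · simp [hx]
    · have hm : f ∈ xs := by cases h with
        | head => exact absurd rfl hx
        | tail _ h' => exact h'
      simp only [if_neg hx]
      split <;> exact ih _ hm

-- once a candidate is fixed and f never occurs later, B returns the candidate
theorem pvBLoop_some (f c : String) (l : List String)
    (h : f ∉ l) : pvBLoop f (some c) l = c := by
  induction l with
  | nil => rfl
  | cons x xs ih =>
    have hx : x ≠ f := fun e => h (e ▸ List.mem_cons_self)
    have hxs : f ∉ xs := fun m => h (List.mem_cons_of_mem _ m)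
    simp [pvBLoop, hx, ih hxs]

-- the while loop, re-expressed structurally on the dropped suffix
def pvAux (f : String) : List String → String
  | [] => ""
  | x :: xs => if f > x then pvAux f xs else x

theorem pvAWhile_eq_aux (f : String) (l : List String) (d : Nat) :
    pvAWhile f l d = pvAux f (l.drop d) := by
  by_cases h : d < l.length
  · have hdrop : l.drop d = l[d] :: l.drop (d + 1) := List.drop_eq_getElem_cons h
    rw [pvAWhile, dif_pos h, hdrop]
    by_cases hc : f > l[d]
    · rw [if_pos hc, pvAux, if_pos hc, pvAWhile_eq_aux]
    · rw [if_neg hc, pvAux, if_neg hc]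
  · rw [pvAWhile, dif_neg h, List.drop_eq_nil_of_le (by omega), pvAux]
termination_by l.length - d

-- when f is absent but some element exceeds it, both scans find the first element > f
theorem pvAux_eq_pvBLoop (f : String) (l : List String)
    (hnot : f ∉ l) (hex : ∃ x ∈ l, f < x) : pvAux f l = pvBLoop f none l := by
  induction l with
  | nil => rcases hex with ⟨x, hx, _⟩; cases hx
  | cons x xs ih =>
    have hx : x ≠ f := fun e => hnot (e ▸ List.mem_cons_self)
    have hxs : f ∉ xs := fun m => hnot (List.mem_cons_of_mem _ m)
    by_cases hlt : f < x
    · have hng : ¬ (f > x) := not_lt_of_gt hlt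
      simp [pvAux, pvBLoop, hng, hx, hlt, pvBLoop_some f x xs hxs]
    · have hg : f > x := by
        rcases lt_trichotomy f x with h | h | h
        · exact absurd h hlt
        · exact absurd h.symm hx
        · exact h
      have hex' : ∃ y ∈ xs, f < y := by
        rcases hex with ⟨y, hy, hfy⟩
        cases hy with
        | head => exact absurd hfy hlt
        | tail _ hy' => exact ⟨y, hy', hfy⟩
      simp [pvAux, pvBLoop, hg, hx, hlt, ih hxs hex']

-- ===== VERDICT (by name: the statement is the Claim_ definition above) =====
theorem find_nearest_price_date_spec : Claim_equal_find_nearest_price_date := by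
  intro f l _ hpre
  unfold Spec_find_nearest_price_date find_nearest_price_date find_nearest_price_date_alt
  by_cases hm : f ∈ l
  · rw [if_pos hm, pvBLoop_mem f none l hm]
  · rw [if_neg hm, pvAWhile_eq_aux, List.drop_zero]
    have hex : ∃ x ∈ l, f < x := by
      cases hpre with
      | inl h => exact absurd h hm
      | inr h => exact h
    exact pvAux_eq_pvBLoop f l hm hex
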